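-- pv_equiv track=rewrite | github.com/FedXL/stud | Gant/interface/logic.py | first_nonzero
-- ===== SOURCE A (Python) =====
-- def first_nonzero(stec: list, max: int) -> int:
--     """вспомогательная функция для make_stecclass
--     находит индекс первого не нулевого элемента
--     если их нет , возвращает 9999"""
--     n = 0
--     while n <= max:
--         n += 1
--         if n in stec:
--             nonzero = stec.index(n)
--             return nonzero
--     return 9999
-- ===== SOURCE B (Python) =====
-- def first_nonzero(stec: list, max: int) -> int:
--     """One pass over the list: collect values in [1, max+1], return the
--     first index of the smallest one (9999 if none)."""
--     candidates = [v for v in stec if 1 <= v <= max + 1]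
--     if not candidates:
--         return 9999
--     return stec.index(min(candidates))
-- ===== Notes on version B (the rewrite author's own statement) =====
-- stated objective: faster
-- what changed: A scans candidate values n=1..max+1 doing a membership test (and then .index) over the whole list for each n; B filters the list once for values in [1,max+1], takes their minimum and returns its first index.
import Mathlib
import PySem

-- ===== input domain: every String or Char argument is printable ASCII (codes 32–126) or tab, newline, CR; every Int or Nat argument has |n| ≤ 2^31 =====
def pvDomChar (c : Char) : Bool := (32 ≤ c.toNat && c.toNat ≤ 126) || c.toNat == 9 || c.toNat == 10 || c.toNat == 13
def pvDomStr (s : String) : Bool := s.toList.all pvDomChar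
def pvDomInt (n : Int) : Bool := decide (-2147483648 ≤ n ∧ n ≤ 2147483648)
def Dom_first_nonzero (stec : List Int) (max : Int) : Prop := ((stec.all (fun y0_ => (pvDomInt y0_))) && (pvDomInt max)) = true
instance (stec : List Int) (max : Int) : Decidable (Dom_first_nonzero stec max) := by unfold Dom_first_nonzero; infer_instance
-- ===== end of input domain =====

-- B replaces A's scan over candidate values 1..max+1 (each with a full-list membership test)
-- by one filter of the list, min of the kept values, and the first index of that min: faster.

-- ===== PORT A =====
-- A's while-loop: n counts up; first n in stec stops the loop with stec.index(n).
def first_nonzero_loop (stec : List Int) (max : Int) (n : Int) : Int :=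
  if _h : n ≤ max then
    let n' := n + 1
    if stec.contains n' then
      (((PySem.List.index? stec n').getD 0 : Nat) : Int)
    else
      first_nonzero_loop stec max n'
  else
    9999
termination_by (max + 1 - n).toNat
decreasing_by omega

def first_nonzero (stec : List Int) (max : Int) : Int :=
  first_nonzero_loop stec max 0

-- ===== PORT B =====
def first_nonzero_alt (stec : List Int) (max : Int) : Int :=
  let candidates := stec.filter (fun v => decide (1 ≤ v) && decide (v ≤ max + 1))
  match PySem.List.min? candidates (fun v => v) with
  | none => 9999
  | some m => (((PySem.List.index? stec m).getD 0 : Nat) : Int)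

-- ===== PRECONDITION & SPEC =====
def Spec_first_nonzero (stec : List Int) (max : Int) (out : Int) : Prop := out = first_nonzero_alt stec max
instance (stec : List Int) (max : Int) (out : Int) : Decidable (Spec_first_nonzero stec max out) := by unfold Spec_first_nonzero; infer_instance

-- ===== CLAIM (what is proved, stated in full; the proofs are below) =====
def Claim_equal_first_nonzero : Prop := ∀ (stec : List Int) (max : Int), Dom_first_nonzero stec max → Spec_first_nonzero stec max (first_nonzero stec max)

-- ===== LEMMAS AND PROOFS =====

-- A's loop from counter n equals: min of the values of stec lying in (n, max+1], then its first index.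
theorem first_nonzero_loop_char (stec : List Int) (max : Int) (n : Int) :
    first_nonzero_loop stec max n =
      match PySem.List.min? (stec.filter (fun v => decide (n < v) && decide (v ≤ max + 1))) (fun v => v) with
      | none => 9999
      | some m => (((PySem.List.index? stec m).getD 0 : Nat) : Int) := by
  generalize hk : (max + 1 - n).toNat = k
  induction k generalizing n with
  | zero =>
    rw [first_nonzero_loop]
    have hnil : stec.filter (fun v => decide (n < v) && decide (v ≤ max + 1)) = [] := by
      apply List.filter_eq_nil_iff.mpr
      intro v _
      simp only [Bool.and_eq_true, decide_eq_true_eq, not_and]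
      omega
    rw [hnil]
    simp only [(PySem.List.min?_eq_none_iff _ _).mpr rfl]
    split <;> omega
  | succ k ih =>
    rw [first_nonzero_loop]
    by_cases hle : n ≤ max
    · simp only [hle, dif_pos]
      by_cases hmem : stec.contains (n + 1)
      · simp only [hmem, if_pos]
        -- the min of the filtered list is exactly n+1
        have hinf : (n + 1) ∈ stec.filter (fun v => decide (n < v) && decide (v ≤ max + 1)) := by
          simp only [List.mem_filter, Bool.and_eq_true, decide_eq_true_eq]
          exact ⟨List.contains_iff_mem.mp hmem, by omega, by omega⟩
        obtain ⟨m, hm⟩ : ∃ m, PySem.List.min? (stec.filter (fun v => decide (n < v) && decide (v ≤ max + 1))) (fun v => v) = some m := by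
          cases hmin : PySem.List.min? (stec.filter (fun v => decide (n < v) && decide (v ≤ max + 1))) (fun v => v) with
          | none =>
            rw [PySem.List.min?_eq_none_iff] at hmin
            rw [hmin] at hinf; cases hinf
          | some m => exact ⟨m, rfl⟩
        have hmmem := PySem.List.min?_mem hm
        have hmin := PySem.List.min?_isMin hm (n + 1) hinf
        simp only [List.mem_filter, Bool.and_eq_true, decide_eq_true_eq] at hmmem
        have hmeq : m = n + 1 := by omega
        rw [hm, hmeq]
      · rw [if_neg hmem]
        have hnotmem : (n + 1) ∉ stec := fun h => hmem (List.contains_iff_mem.mpr h)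
        have hfe : stec.filter (fun v => decide (n < v) && decide (v ≤ max + 1))
            = stec.filter (fun v => decide (n + 1 < v) && decide (v ≤ max + 1)) := by
          apply List.filter_congr
          intro v hv
          have hne : v ≠ n + 1 := fun h => hnotmem (h ▸ hv)
          rw [Bool.eq_iff_iff]
          simp only [Bool.and_eq_true, decide_eq_true_eq]
          constructor <;> · intro h; omega
        rw [hfe]
        exact ih (n + 1) (by omega)
    · rw [dif_neg hle]
      have hnil : stec.filter (fun v => decide (n < v) && decide (v ≤ max + 1)) = [] := by
        apply List.filter_eq_nil_iff.mpr
        intro v _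
        simp only [Bool.and_eq_true, decide_eq_true_eq, not_and]
        omega
      rw [hnil, (PySem.List.min?_eq_none_iff _ _).mpr rfl]

-- ===== VERDICT (by name: the statement is the Claim_ definition above) =====
theorem first_nonzero_spec : Claim_equal_first_nonzero := by
  intro stec max _
  unfold Spec_first_nonzero first_nonzero first_nonzero_alt
  rw [first_nonzero_loop_char]
  have hfe : stec.filter (fun v => decide ((0:Int) < v) && decide (v ≤ max + 1))
      = stec.filter (fun v => decide (1 ≤ v) && decide (v ≤ max + 1)) := by
    apply List.filter_congr
    intro v _
    rw [Bool.eq_iff_iff]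
    simp only [Bool.and_eq_true, decide_eq_true_eq]
    constructor <;> · intro h; omega
  rw [hfe]
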